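-- pv_equiv track=rewrite | github.com/ivaibhavkulkarni/Problem-Solving | matrix_Min_Max_in_row.py | min_max_sum
-- ===== SOURCE A (Python) =====
-- def min_max_sum(num_list):
--     final = []
--     max_list = []
--     min_list = []
--     sum_list = []
--     for i in num_list:
--         max_list.append(max(i))
--         min_list.append(min(i))
--         sum_list.append(sum(i))
--     final.append(max_list)
--     final.append(min_list)
--     final.append(sum_list)
--     return final
-- ===== SOURCE B (Python) =====
-- def min_max_sum(num_list):
--     # Recursive divide-and-conquer per row: split the row in half, combine
--     # (max, min, sum) triples; result built by structural recursion over the rows.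
--     def triple(row):
--         if len(row) == 1:
--             x = row[0]
--             return (x, x, x)
--         k = len(row) // 2
--         a1, b1, c1 = triple(row[:k])
--         a2, b2, c2 = triple(row[k:])
--         return (a1 if a1 > a2 else a2, b1 if b1 < b2 else b2, c1 + c2)
--
--     def build(rows):
--         if not rows:
--             return ([], [], [])
--         mx, mn, sm = build(rows[1:])
--         a, b, c = triple(rows[0])
--         return ([a] + mx, [b] + mn, [c] + sm)
--
--     mx, mn, sm = build(num_list)
--     return [mx, mn, sm]
-- ===== Notes on version B (the rewrite author's own statement) =====
-- stated objective: alternative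
-- what changed: Replaces A's iterative loop with three builtin calls per row by a recursive divide-and-conquer that splits each row in half and merges (max, min, sum) triples, with the three result lists built by structural recursion over the rows.
-- outside the precondition, e.g. on min_max_sum([[]]): A raises ValueError, B raises RecursionError
import Mathlib
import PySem

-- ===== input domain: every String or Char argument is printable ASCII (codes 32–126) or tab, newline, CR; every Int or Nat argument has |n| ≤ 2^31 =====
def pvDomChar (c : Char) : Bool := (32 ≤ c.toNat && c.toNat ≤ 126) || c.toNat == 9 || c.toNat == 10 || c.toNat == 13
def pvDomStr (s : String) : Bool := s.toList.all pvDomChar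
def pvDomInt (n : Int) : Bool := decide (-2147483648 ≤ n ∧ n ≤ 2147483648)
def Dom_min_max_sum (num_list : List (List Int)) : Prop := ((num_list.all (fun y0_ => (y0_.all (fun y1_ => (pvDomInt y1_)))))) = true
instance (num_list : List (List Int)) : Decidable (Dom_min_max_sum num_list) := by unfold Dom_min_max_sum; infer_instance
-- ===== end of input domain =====

-- B replaces A's loop with three builtin calls per row by recursive divide-and-conquer
-- over each row merging (max, min, sum) triples; objective: alternative decomposition.

-- ===== PORT A =====
-- A: loop over rows appending max(i), min(i), sum(i) to three lists, then final = [max_list, min_list, sum_list].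
-- max(i)/min(i) raise ValueError on an empty row → Pre_ excludes empty rows; getD 0 is never reached under Pre_.
def min_max_sum (num_list : List (List Int)) : List (List Int) :=
  let st := num_list.foldl
    (fun (acc : List Int × List Int × List Int) i =>
      (acc.1 ++ [(PySem.List.max? i (fun y => y)).getD 0],
       acc.2.1 ++ [(PySem.List.min? i (fun y => y)).getD 0],
       acc.2.2 ++ [i.sum]))
    ([], [], [])
  [st.1, st.2.1, st.2.2]

-- ===== PORT B =====
-- divide-and-conquer triple of a row; Python's triple recurses forever on an empty row
-- (RecursionError, outside Pre_), so the [] branch here is unreachable under Pre_.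
def pvTriple (row : List Int) : Int × Int × Int :=
  match row with
  | [] => (0, 0, 0)
  | [x] => (x, x, x)
  | a :: b :: t =>
    let r := a :: b :: t
    let k := r.length / 2
    let t1 := pvTriple (r.take k)
    let t2 := pvTriple (r.drop k)
    (if t1.1 > t2.1 then t1.1 else t2.1,
     if t1.2.1 < t2.2.1 then t1.2.1 else t2.2.1,
     t1.2.2 + t2.2.2)
termination_by row.length
decreasing_by
  · simp [List.length_take]; omega
  · simp [List.length_drop]; omega

-- structural recursion over the rows building the three lists together
def pvBuild (rows : List (List Int)) : List Int × List Int × List Int :=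
  match rows with
  | [] => ([], [], [])
  | row :: rest =>
    let f := pvBuild rest
    let t := pvTriple row
    (t.1 :: f.1, t.2.1 :: f.2.1, t.2.2 :: f.2.2)

def min_max_sum_alt (num_list : List (List Int)) : List (List Int) :=
  let f := pvBuild num_list
  [f.1, f.2.1, f.2.2]

-- ===== PRECONDITION & SPEC =====
-- Pre_ excludes inputs containing an empty row, on which A raises ValueError (from max).
def Pre_min_max_sum (num_list : List (List Int)) : Prop := ∀ i ∈ num_list, i ≠ []
instance (num_list : List (List Int)) : Decidable (Pre_min_max_sum num_list) := by unfold Pre_min_max_sum; infer_instance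
def pvWitness_min_max_sum : List (List Int) := [[3, -1, 4], [1], [5, 9, 2]]

def Spec_min_max_sum (num_list : List (List Int)) (out : List (List Int)) : Prop := out = min_max_sum_alt num_list
instance (num_list : List (List Int)) (out : List (List Int)) : Decidable (Spec_min_max_sum num_list out) := by unfold Spec_min_max_sum; infer_instance

-- ===== CLAIM (what is proved, stated in full; the proofs are below) =====
def Claim_equal_min_max_sum : Prop := ∀ (num_list : List (List Int)), Dom_min_max_sum num_list → Pre_min_max_sum num_list → Spec_min_max_sum num_list (min_max_sum num_list)

-- ===== LEMMAS AND PROOFS =====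

-- reference values per row: what A's builtins compute on a nonempty row
def pvMaxv : List Int → Int
  | [] => 0
  | h :: t => t.foldl max h

def pvMinv : List Int → Int
  | [] => 0
  | h :: t => t.foldl min h

theorem pvFoldMax_out (t : List Int) : ∀ a b : Int, t.foldl max (max a b) = max a (t.foldl max b) := by
  induction t with
  | nil => intro a b; rfl
  | cons x t ih =>
    intro a b
    simp only [List.foldl_cons, max_assoc, ih]

theorem pvFoldMin_out (t : List Int) : ∀ a b : Int, t.foldl min (min a b) = min a (t.foldl min b) := by
  induction t with
  | nil => intro a b; rfl
  | cons x t ih =>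
    intro a b
    simp only [List.foldl_cons, min_assoc, ih]

theorem pvMaxv_append (l r : List Int) (hl : l ≠ []) (hr : r ≠ []) :
    pvMaxv (l ++ r) = max (pvMaxv l) (pvMaxv r) := by
  match l, r with
  | a :: tl, b :: tr =>
    simp only [pvMaxv, List.cons_append, List.foldl_append, List.foldl_cons]
    rw [pvFoldMax_out]

theorem pvMinv_append (l r : List Int) (hl : l ≠ []) (hr : r ≠ []) :
    pvMinv (l ++ r) = min (pvMinv l) (pvMinv r) := by
  match l, r with
  | a :: tl, b :: tr =>
    simp only [pvMinv, List.cons_append, List.foldl_append, List.foldl_cons]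
    rw [pvFoldMin_out]

-- correctness of the divide-and-conquer triple on a nonempty row
theorem pvTriple_correct (row : List Int) (h : row ≠ []) :
    pvTriple row = (pvMaxv row, pvMinv row, row.sum) := by
  match row with
  | [x] => simp [pvTriple, pvMaxv, pvMinv]
  | a :: b :: t =>
    rw [pvTriple]
    have hk : 1 ≤ (a :: b :: t).length / 2 ∧ (a :: b :: t).length / 2 < (a :: b :: t).length := by
      simp; omega
    have htk : (a :: b :: t).take ((a :: b :: t).length / 2) ≠ [] := by
      refine List.ne_nil_of_length_pos ?_
      rw [List.length_take]
      simp only [List.length_cons]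
      omega
    have hdk : (a :: b :: t).drop ((a :: b :: t).length / 2) ≠ [] := by
      refine List.ne_nil_of_length_pos ?_
      rw [List.length_drop]
      simp only [List.length_cons]
      omega
    have ih1 := pvTriple_correct ((a :: b :: t).take ((a :: b :: t).length / 2)) htk
    have ih2 := pvTriple_correct ((a :: b :: t).drop ((a :: b :: t).length / 2)) hdk
    simp only [ih1, ih2]
    have hsplit := List.take_append_drop ((a :: b :: t).length / 2) (a :: b :: t)
    rw [Prod.mk.injEq, Prod.mk.injEq]
    refine ⟨?_, ?_, ?_⟩
    · rw [show pvMaxv (a :: b :: t) = pvMaxv (_ ++ _) from by rw [hsplit],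
        pvMaxv_append _ _ htk hdk]
      rw [max_def]
      split_ifs <;> omega
    · rw [show pvMinv (a :: b :: t) = pvMinv (_ ++ _) from by rw [hsplit],
        pvMinv_append _ _ htk hdk]
      rw [min_def]
      split_ifs <;> omega
    · conv_rhs => rw [← hsplit]
      rw [List.sum_append]
termination_by row.length
decreasing_by
  · simp [List.length_take]; omega
  · simp [List.length_drop]; omega

-- A's builtins on a nonempty row equal the reference values
theorem pvMax_builtin (row : List Int) (h : row ≠ []) :
    (PySem.List.max? row (fun y => y)).getD 0 = pvMaxv row := by
  match row with
  | a :: t => rw [PySem.List.max?_id_cons]; rfl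

theorem pvMin_builtin (row : List Int) (h : row ≠ []) :
    (PySem.List.min? row (fun y => y)).getD 0 = pvMinv row := by
  match row with
  | a :: t => rw [PySem.List.min?_id_cons]; rfl

-- B's recursive build characterised by the reference values
theorem pvBuild_eq (rows : List (List Int)) (hne : ∀ i ∈ rows, i ≠ []) :
    pvBuild rows = (rows.map pvMaxv, rows.map pvMinv, rows.map List.sum) := by
  induction rows with
  | nil => rfl
  | cons row rest ih =>
    have h0 : row ≠ [] := hne row (List.mem_cons_self ..)
    simp only [pvBuild, List.map_cons, ih (fun j hj => hne j (List.mem_cons_of_mem _ hj)),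
      pvTriple_correct row h0]

-- A's accumulating fold characterised with general accumulators
theorem pvFold_eq (l : List (List Int)) (hne : ∀ i ∈ l, i ≠ []) :
    ∀ (a b c : List Int),
      l.foldl
        (fun (acc : List Int × List Int × List Int) i =>
          (acc.1 ++ [(PySem.List.max? i (fun y => y)).getD 0],
           acc.2.1 ++ [(PySem.List.min? i (fun y => y)).getD 0],
           acc.2.2 ++ [i.sum]))
        (a, b, c)
      = (a ++ l.map pvMaxv, b ++ l.map pvMinv, c ++ l.map List.sum) := by
  induction l with
  | nil => intro a b c; simp
  | cons i l ih =>
    intro a b c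
    have hi : i ≠ [] := hne i (List.mem_cons_self ..)
    simp only [List.foldl_cons, List.map_cons, ih (fun j hj => hne j (List.mem_cons_of_mem _ hj)),
      pvMax_builtin i hi, pvMin_builtin i hi, List.append_assoc]
    simp

-- ===== VERDICT (by name: the statement is the Claim_ definition above) =====
theorem min_max_sum_spec : Claim_equal_min_max_sum := by
  intro num_list _ hpre
  show min_max_sum num_list = min_max_sum_alt num_list
  simp only [min_max_sum, min_max_sum_alt, pvFold_eq num_list hpre [] [] [],
    pvBuild_eq num_list hpre]
  simp
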